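-- pv_equiv track=rewrite | github.com/AdithyaRajagopalan24/LeetcodeAnswers | 3679-minimum-discards-to-balance-inventory/3679-minimum-discards-to-balance-inventory.py | minArrivalsToDiscard
-- ===== SOURCE A (Python) =====
-- from collections import defaultdict, deque
-- from typing import List
--
-- def minArrivalsToDiscard(arrivals: List[int], window: int, maxCount: int) -> int:
--     typeQueue = defaultdict(deque)
--     discardCount = 0
--
--     for day, arrivalType in enumerate(arrivals, 1):
--         queue = typeQueue[arrivalType]
--         leftBound = day - window + 1
--
--         while queue and queue[0] < leftBound:
--             queue.popleft()
--
--         if len(queue) >= maxCount: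
--             discardCount += 1
--         else:
--             queue.append(day)
--
--     return discardCount
-- ===== SOURCE B (Python) =====
-- def minArrivalsToDiscard(arrivals, window, maxCount):
--     accepted = {}          # type -> sorted list of ALL accepted days (never evicted)
--     discards = 0
--     for day, t in enumerate(arrivals, 1):
--         lst = accepted.setdefault(t, [])
--         left = day - window + 1
--         # bisect_left(lst, left) by hand (binary search; lst is strictly increasing)
--         lo, hi = 0, len(lst)
--         while lo < hi:
--             mid = (lo + hi) // 2
--             if lst[mid] < left:
--                 lo = mid + 1
--             else:
--                 hi = mid
--         if len(lst) - lo >= maxCount: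
--             discards += 1
--         else:
--             lst.append(day)
--     return discards
-- ===== Notes on version B (the rewrite author's own statement) =====
-- stated objective: alternative
-- what changed: B keeps, per type, the full sorted list of accepted days and counts the in-window ones with a hand-written bisect_left binary search, instead of A's per-type deque with a while-loop evicting expired entries.
import Mathlib
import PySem

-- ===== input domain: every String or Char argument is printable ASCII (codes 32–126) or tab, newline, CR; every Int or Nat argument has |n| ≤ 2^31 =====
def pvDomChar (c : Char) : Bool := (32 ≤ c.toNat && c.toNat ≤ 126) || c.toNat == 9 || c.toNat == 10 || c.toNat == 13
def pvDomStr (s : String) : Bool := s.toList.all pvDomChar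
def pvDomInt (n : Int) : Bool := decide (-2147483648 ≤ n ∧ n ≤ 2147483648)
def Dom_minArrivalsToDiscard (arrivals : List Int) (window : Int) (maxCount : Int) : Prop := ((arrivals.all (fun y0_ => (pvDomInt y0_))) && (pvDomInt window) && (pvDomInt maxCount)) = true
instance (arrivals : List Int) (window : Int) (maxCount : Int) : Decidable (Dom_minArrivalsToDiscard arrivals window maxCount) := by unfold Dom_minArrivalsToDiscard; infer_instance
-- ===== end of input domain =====

-- B replaces A's per-type deque with while-loop eviction by the full per-type sorted list of
-- accepted days plus a hand-written bisect_left binary search counting the in-window ones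
-- (objective: alternative algorithm; a timing run measured B faster by a constant factor).

-- ===== PORT A =====
-- while queue and queue[0] < leftBound: queue.popleft()
def pvEvict (lb : Int) : List Int → List Int
  | [] => []
  | h :: t => if h < lb then pvEvict lb t else h :: t

-- the for-loop over enumerate(arrivals, 1); state = (day, typeQueue, discardCount)
def pvLoopA (window maxCount : Int) : List Int → Int → PySem.Dict Int (List Int) → Int → Int
  | [], _, _, cnt => cnt
  | t :: rest, day, d, cnt =>
      let q := d.getD t []                  -- typeQueue[arrivalType] (defaultdict default: empty deque)
      let lb := day - window + 1
      let q' := pvEvict lb q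
      if (q'.length : Int) ≥ maxCount then
        pvLoopA window maxCount rest (day + 1) (d.insert t q') (cnt + 1)
      else
        pvLoopA window maxCount rest (day + 1) (d.insert t (q' ++ [day])) cnt

def minArrivalsToDiscard (arrivals : List Int) (window : Int) (maxCount : Int) : Int :=
  pvLoopA window maxCount arrivals 1 PySem.Dict.empty 0

-- ===== PORT B =====
-- hand-written bisect_left loop; lst[mid] is always in range here, so List.getD mid 0 is exact
def pvBisect (lst : List Int) (x : Int) (lo hi : Nat) : Nat :=
  if _h : lo < hi then
    if lst.getD ((lo + hi) / 2) 0 < x then pvBisect lst x ((lo + hi) / 2 + 1) hi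
    else pvBisect lst x lo ((lo + hi) / 2)
  else lo
termination_by hi - lo
decreasing_by all_goals omega

def pvLoopB (window maxCount : Int) : List Int → Int → PySem.Dict Int (List Int) → Int → Int
  | [], _, _, cnt => cnt
  | t :: rest, day, d, cnt =>
      let d1 := d.setdefault t []           -- lst = accepted.setdefault(t, [])
      let lst := d1.getD t []
      let lb := day - window + 1
      let lo := pvBisect lst lb 0 lst.length
      if (lst.length : Int) - (lo : Int) ≥ maxCount then
        pvLoopB window maxCount rest (day + 1) d1 (cnt + 1)
      else
        pvLoopB window maxCount rest (day + 1) (d1.insert t (lst ++ [day])) cnt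

def minArrivalsToDiscard_alt (arrivals : List Int) (window : Int) (maxCount : Int) : Int :=
  pvLoopB window maxCount arrivals 1 PySem.Dict.empty 0

-- ===== PRECONDITION & SPEC =====
def Spec_minArrivalsToDiscard (arrivals : List Int) (window : Int) (maxCount : Int) (out : Int) : Prop := out = minArrivalsToDiscard_alt arrivals window maxCount
instance (arrivals : List Int) (window : Int) (maxCount : Int) (out : Int) : Decidable (Spec_minArrivalsToDiscard arrivals window maxCount out) := by unfold Spec_minArrivalsToDiscard; infer_instance

-- ===== CLAIM (what is proved, stated in full; the proofs are below) =====
def Claim_equal_minArrivalsToDiscard : Prop := ∀ (arrivals : List Int) (window : Int) (maxCount : Int), Dom_minArrivalsToDiscard arrivals window maxCount → Spec_minArrivalsToDiscard arrivals window maxCount (minArrivalsToDiscard arrivals window maxCount)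

-- ===== LEMMAS AND PROOFS =====

-- getD with the setdefault's own default is invisible
theorem pv_getD_setdefault (d : PySem.Dict Int (List Int)) (k k' : Int) :
    (d.setdefault k []).getD k' [] = d.getD k' [] := by
  by_cases hc : d.contains k = true
  · rw [PySem.Dict.setdefault_of_contains d [] hc]
  · rw [PySem.Dict.setdefault_of_not_contains d [] (by simpa using hc)]
    rw [PySem.Dict.getD_insert]
    split
    · next h => subst h; rw [PySem.Dict.getD_of_not_contains (h := by simpa using hc)]
    · rfl

theorem pvEvict_eq_dropWhile (lb : Int) (l : List Int) :
    pvEvict lb l = l.dropWhile (fun x => decide (x < lb)) := by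
  induction l with
  | nil => rfl
  | cons h t ih =>
      simp only [pvEvict, List.dropWhile]
      by_cases hh : h < lb <;> simp [hh, ih]

theorem pv_dropWhile_append (p : Int → Bool) (pre l : List Int) (hp : ∀ x ∈ pre, p x = true) :
    (pre ++ l).dropWhile p = l.dropWhile p := by
  induction pre with
  | nil => rfl
  | cons h t ih =>
      simp only [List.cons_append, List.dropWhile_cons, hp h (by simp)]
      exact ih (fun x hx => hp x (by simp [hx]))

-- on a strictly increasing list, dropping the < lb prefix is the same as filtering
theorem pv_sorted_dropWhile_eq_filter (lb : Int) (l : List Int) (hs : l.Pairwise (· < ·)) :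
    l.dropWhile (fun x => decide (x < lb)) = l.filter (fun x => !decide (x < lb)) := by
  induction l with
  | nil => rfl
  | cons h t ih =>
      rcases List.pairwise_cons.mp hs with ⟨hlt, ht⟩
      by_cases hh : h < lb
      · simp [hh, ih ht]
      · have hall : ∀ x ∈ t, (!decide (x < lb)) = true := by
          intro x hx
          have : h < x := hlt x hx
          simp; omega
        simp [hh, List.filter_eq_self.mpr hall]

theorem pv_countP_split (l : List Int) (p : Int → Bool) (k : Nat) (hk : k ≤ l.length)
    (hlo : ∀ i, ∀ h : i < l.length, i < k → p l[i] = true)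
    (hhi : ∀ i, ∀ h : i < l.length, k ≤ i → p l[i] = false) :
    l.countP p = k := by
  induction l generalizing k with
  | nil =>
      simp only [List.length_nil, Nat.le_zero] at hk
      simp [hk]
  | cons h t ih =>
      cases k with
      | zero =>
          have : ∀ a ∈ h :: t, ¬ p a = true := by
            intro a ha
            rcases List.mem_iff_getElem.mp ha with ⟨i, hi, rfl⟩
            simp [hhi i hi (Nat.zero_le i)]
          simpa using List.countP_eq_zero.mpr this
      | succ k' =>
          have hph : p h = true := hlo 0 (by simp) (Nat.succ_pos k')
          rw [List.countP_cons_of_pos hph]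
          have := ih k' (by simpa using hk)
            (fun i hi hik => by simpa using hlo (i+1) (by simpa using hi) (by omega))
            (fun i hi hik => by simpa using hhi (i+1) (by simpa using hi) (by omega))
          omega

theorem pvBisect_eq_countP (lst : List Int) (x : Int) (hs : lst.Pairwise (· < ·)) :
    ∀ n lo hi, hi - lo = n → lo ≤ hi → hi ≤ lst.length →
    (∀ i, ∀ h : i < lst.length, i < lo → lst[i] < x) →
    (∀ i, ∀ h : i < lst.length, hi ≤ i → ¬ lst[i] < x) →
    pvBisect lst x lo hi = lst.countP (fun y => decide (y < x)) := by
  intro n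
  induction n using Nat.strong_induction_on with
  | _ n ih =>
      intro lo hi hn hle hhi hlow hhigh
      rw [pvBisect]
      split
      · next hlt =>
          have hmid : (lo + hi) / 2 < lst.length := by omega
          have hgd : lst.getD ((lo + hi) / 2) 0 = lst[(lo + hi) / 2] :=
            List.getD_eq_getElem lst 0 hmid
          have hmono := List.pairwise_iff_getElem.mp hs
          split
          · next hbranch =>
              rw [hgd] at hbranch
              refine ih (hi - ((lo + hi) / 2 + 1)) (by omega) _ _ rfl (by omega) hhi ?_ hhigh
              intro i hilen hik
              by_cases hi' : i < (lo + hi) / 2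
              · exact lt_trans (hmono i _ hilen hmid hi') hbranch
              · have : i = (lo + hi) / 2 := by omega
                subst this; exact hbranch
          · next hbranch =>
              rw [hgd] at hbranch
              refine ih ((lo + hi) / 2 - lo) (by omega) _ _ rfl (by omega) (by omega) hlow ?_
              intro i hilen hik
              by_cases hi' : (lo + hi) / 2 < i
              · have := hmono _ i hmid hilen hi'
                omega
              · have : i = (lo + hi) / 2 := by omega
                subst this; exact hbranch
      · next hlt =>
          have : lo = hi := by omega
          subst this
          symm
          refine pv_countP_split lst _ lo (by omega) ?_ ?_
          · intro i hi hik; simpa using hlow i hi hik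
          · intro i hi hik; simpa using hhigh i hi hik

-- the loop invariant: B's list for each type is A's (evicted) deque with an expired,
-- already-droppable prefix in front; B's lists are strictly increasing, elements are past days
def pvInv (day window : Int) (dA dB : PySem.Dict Int (List Int)) : Prop :=
  ∀ t : Int, ∃ pre, dB.getD t [] = pre ++ dA.getD t [] ∧
    (∀ x ∈ pre, x < day - window + 1) ∧
    (dB.getD t []).Pairwise (· < ·) ∧
    (∀ x ∈ dB.getD t [], x < day)

theorem pvLoop_eq (window maxCount : Int) (rest : List Int) :
    ∀ (day : Int) (dA dB : PySem.Dict Int (List Int)) (cnt : Int),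
    pvInv day window dA dB →
    pvLoopA window maxCount rest day dA cnt = pvLoopB window maxCount rest day dB cnt := by
  induction rest with
  | nil => intro day dA dB cnt _; rfl
  | cons t rest ih =>
      intro day dA dB cnt hinv
      obtain ⟨pre, hsplit, hpre, hsort, hday⟩ := hinv t
      simp only [pvLoopA, pvLoopB]
      set qa := dA.getD t [] with hqa
      set lb := day - window + 1 with hlb
      set p : Int → Bool := fun x => decide (x < lb) with hp
      set qb := dB.getD t [] with hqb
      have hlst : (dB.setdefault t []).getD t [] = qb := pv_getD_setdefault dB t t
      -- A's evicted queue equals the ≥ lb filter of B's list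
      have hE : pvEvict lb qa = qb.filter (fun x => !p x) := by
        rw [pvEvict_eq_dropWhile, ← pv_dropWhile_append p pre qa (fun x hx => by
          simp [hp]; exact hpre x hx), ← hsplit]
        exact pv_sorted_dropWhile_eq_filter lb qb hsort
      -- B's bisect equals the count of the < lb prefix of B's list
      have hB : pvBisect qb lb 0 qb.length = qb.countP p := by
        refine pvBisect_eq_countP qb lb hsort qb.length 0 qb.length (by omega) (by omega)
          (le_refl _) (by omega) ?_
        intro i hi hge; omega
      -- the two counts compared with maxCount are equal
      have hlen : ((pvEvict lb qa).length : Int) = (qb.length : Int) - (qb.countP p : Int) := by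
        rw [hE]
        have h1 : (qb.filter (fun x => !p x)).length = qb.countP (fun x => !p x) :=
          List.countP_eq_length_filter.symm
        have h2 : qb.length = qb.countP p + qb.countP (fun x => !p x) := by
          simpa using List.length_eq_countP_add_countP p (l := qb)
        omega
      have hps : (qb ++ [day]).Pairwise (· < ·) := by
        refine List.pairwise_append.mpr ⟨hsort, by simp, ?_⟩
        intro x hx y hy
        simp at hy; subst hy
        exact hday x hx
      have hpd : ∀ x ∈ qb ++ [day], x < day + 1 := by
        intro x hx
        rcases List.mem_append.mp hx with h | h
        · have := hday x h; omega
        · simp at h; omega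
      -- the prefix split for the next step
      have hsplit' : qb = qb.takeWhile p ++ pvEvict lb qa := by
        rw [hE, ← pv_sorted_dropWhile_eq_filter lb qb hsort, hp]
        exact (List.takeWhile_append_dropWhile).symm
      have hpre' : ∀ x ∈ qb.takeWhile p, x < lb := by
        intro x hx
        have := List.mem_takeWhile_imp hx
        simpa [hp] using this
      rw [hlst, hB, hlen]
      by_cases hcond : (qb.length : Int) - (qb.countP p : Int) ≥ maxCount
      · simp only [if_pos hcond]
        refine ih (day + 1) _ _ (cnt + 1) ?_
        intro t'
        by_cases ht' : t' = t
        · subst ht'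
          refine ⟨qb.takeWhile p, ?_, ?_, ?_, ?_⟩
          · rw [pv_getD_setdefault, PySem.Dict.getD_insert, if_pos rfl, ← hqb]
            exact hsplit'
          · intro x hx; have := hpre' x hx; omega
          · rw [pv_getD_setdefault, ← hqb]; exact hsort
          · rw [pv_getD_setdefault, ← hqb]
            intro x hx; have := hday x hx; omega
        · obtain ⟨pre2, h1, h2, h3, h4⟩ := hinv t'
          refine ⟨pre2, ?_, ?_, ?_, ?_⟩
          · rw [pv_getD_setdefault, PySem.Dict.getD_insert, if_neg ht']; exact h1
          · intro x hx; have := h2 x hx; omega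
          · rw [pv_getD_setdefault]; exact h3
          · rw [pv_getD_setdefault]; intro x hx; have := h4 x hx; omega
      · simp only [if_neg hcond]
        refine ih (day + 1) _ _ cnt ?_
        intro t'
        by_cases ht' : t' = t
        · subst ht'
          refine ⟨qb.takeWhile p, ?_, ?_, ?_, ?_⟩
          · rw [PySem.Dict.getD_insert, if_pos rfl, PySem.Dict.getD_insert, if_pos rfl]
            try rw [hlst]
            rw [← List.append_assoc, ← hsplit']
          · intro x hx; have := hpre' x hx; omega
          · rw [PySem.Dict.getD_insert, if_pos rfl]
            try rw [hlst]
            exact hps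
          · rw [PySem.Dict.getD_insert, if_pos rfl]
            try rw [hlst]
            exact hpd
        · obtain ⟨pre2, h1, h2, h3, h4⟩ := hinv t'
          refine ⟨pre2, ?_, ?_, ?_, ?_⟩
          · rw [PySem.Dict.getD_insert, if_neg ht', PySem.Dict.getD_insert, if_neg ht',
              pv_getD_setdefault]
            exact h1
          · intro x hx; have := h2 x hx; omega
          · rw [PySem.Dict.getD_insert, if_neg ht', pv_getD_setdefault]; exact h3
          · rw [PySem.Dict.getD_insert, if_neg ht', pv_getD_setdefault]
            intro x hx; have := h4 x hx; omega

-- ===== VERDICT (by name: the statement is the Claim_ definition above) =====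
theorem minArrivalsToDiscard_spec : Claim_equal_minArrivalsToDiscard := by
  intro arrivals window maxCount _
  show minArrivalsToDiscard arrivals window maxCount = minArrivalsToDiscard_alt arrivals window maxCount
  unfold minArrivalsToDiscard minArrivalsToDiscard_alt
  refine pvLoop_eq window maxCount arrivals 1 _ _ 0 ?_
  intro t
  exact ⟨[], by simp [PySem.Dict.getD_empty], by simp, by simp [PySem.Dict.getD_empty], by simp [PySem.Dict.getD_empty]⟩
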